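-- pv_equiv track=rewrite | github.com/Donna831500/Data_Mining | Recommendation Systems/task1.py | get_baskets
-- ===== SOURCE A (Python) =====
-- def get_baskets(rows, all_bus):
--     temp_result = dict()
--     for each_bus in all_bus:
--         total = 0
--         product = 1
--         for each_dict in rows:
--             total = total+each_dict.get(each_bus)
--             product = product*each_dict.get(each_bus)
--         #basket_number = total % 10000
--         basket_number = (total+product) % 1000000
--         basket_contain = temp_result.get(basket_number, [])
--         temp_result[basket_number] = basket_contain + [each_bus]
--
--     # filter (key,value) pair with len(value)==1
--     result = dict()
--     for (key, value) in temp_result.items():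
--         if len(value)>1:
--             result[key]=value
--
--     return result
-- ===== SOURCE B (Python) =====
-- def get_baskets(rows, all_bus):
--     # B: build a flat keyed list (column extraction + builtin sum, separate product
--     # pass), then group by scanning the keyed list per first-seen key (no bucket dict
--     # being updated incrementally), filtering singletons on the fly.
--     keyed = []
--     for b in all_bus:
--         vals = [row.get(b) for row in rows]
--         p = 1
--         for v in vals:
--             p = p * v
--         keyed.append(((sum(vals) + p) % 1000000, b))
--
--     result = {}
--     seen = set()
--     for k, b in keyed:
--         if k not in seen:
--             seen.add(k)
--             group = [b2 for k2, b2 in keyed if k2 == k]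
--             if len(group) > 1:
--                 result[k] = group
--     return result
-- ===== Notes on version B (the rewrite author's own statement) =====
-- stated objective: alternative
-- what changed: B first builds a flat (basket_number, bus) keyed list (column extraction with builtin sum and a separate product pass), then groups by scanning the keyed list once per first-seen key with a seen-set and filters singletons on the fly, instead of A's incrementally updated bucket dict followed by a filtering pass.
import Mathlib
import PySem

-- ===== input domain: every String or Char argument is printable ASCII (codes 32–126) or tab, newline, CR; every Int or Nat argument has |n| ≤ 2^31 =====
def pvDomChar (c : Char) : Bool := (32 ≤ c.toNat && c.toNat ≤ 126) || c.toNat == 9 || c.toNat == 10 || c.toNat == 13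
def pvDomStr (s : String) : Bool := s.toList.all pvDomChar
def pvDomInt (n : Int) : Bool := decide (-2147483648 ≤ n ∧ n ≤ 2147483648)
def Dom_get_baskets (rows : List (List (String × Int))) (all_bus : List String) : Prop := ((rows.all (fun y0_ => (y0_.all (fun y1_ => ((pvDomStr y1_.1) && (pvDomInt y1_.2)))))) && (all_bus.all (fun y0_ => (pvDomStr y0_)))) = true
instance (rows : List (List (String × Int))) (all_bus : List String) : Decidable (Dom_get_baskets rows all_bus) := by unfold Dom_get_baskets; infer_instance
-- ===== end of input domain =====

-- B builds a flat (basket_number, bus) list and groups it by scanning per first-seen key with a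
-- seen-set, instead of A's incrementally updated bucket dict (alternative decomposition);
-- return-value equivalence only (neither version mutates its arguments).

-- ===== PORT A =====
-- each_dict.get(each_bus): first-match lookup in the row; Pre_ guarantees presence, so getD 0 is exact there
def pvRowGet (row : List (String × Int)) (b : String) : Int :=
  ((PySem.Dict.mk row).get? b).getD 0

def get_baskets (rows : List (List (String × Int))) (all_bus : List String) : List (Int × List String) :=
  let temp : PySem.Dict Int (List String) :=
    all_bus.foldl (fun d each_bus =>
      let tp := rows.foldl
        (fun (tp : Int × Int) each_dict =>
          (tp.1 + pvRowGet each_dict each_bus, tp.2 * pvRowGet each_dict each_bus)) ((0 : Int), (1 : Int))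
      let basket_number := PySem.Int.mod (tp.1 + tp.2) 1000000
      d.insert basket_number (d.getD basket_number [] ++ [each_bus])) PySem.Dict.empty
  (temp.items.foldl
    (fun (r : PySem.Dict Int (List String)) kv =>
      if 1 < kv.2.length then r.insert kv.1 kv.2 else r) PySem.Dict.empty).items

-- ===== PORT B =====
def get_baskets_alt (rows : List (List (String × Int))) (all_bus : List String) : List (Int × List String) :=
  let keyed : List (Int × String) :=
    all_bus.foldl (fun keyed b =>
      let vals := rows.map (fun row => pvRowGet row b)
      let p := vals.foldl (fun p v => p * v) 1
      keyed ++ [(PySem.Int.mod (vals.sum + p) 1000000, b)]) []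
  (keyed.foldl (fun (st : PySem.Dict Int (List String) × PySem.Set Int) kb =>
      if PySem.Set.contains st.2 kb.1 then st
      else
        let group := (keyed.filter (fun kb2 => kb2.1 == kb.1)).map Prod.snd
        (if 1 < group.length then st.1.insert kb.1 group else st.1,
         PySem.Set.add st.2 kb.1))
    (PySem.Dict.empty, PySem.Set.empty)).1.items

-- ===== PRECONDITION & SPEC =====
-- Pre_ excludes exactly the inputs where A raises TypeError: some bus of all_bus missing from some
-- row, so each_dict.get returns None and None cannot be added/multiplied.
def Pre_get_baskets (rows : List (List (String × Int))) (all_bus : List String) : Prop :=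
  ∀ row ∈ rows, ∀ b ∈ all_bus, b ∈ row.map Prod.fst
instance (rows : List (List (String × Int))) (all_bus : List String) : Decidable (Pre_get_baskets rows all_bus) := by unfold Pre_get_baskets; infer_instance

def pvWitness_get_baskets : (List (List (String × Int))) × List String :=
  ([[("a", 2), ("b", 3)], [("a", 3), ("b", 2)]], ["a", "b"])

def Spec_get_baskets (rows : List (List (String × Int))) (all_bus : List String) (out : List (Int × List String)) : Prop := out = get_baskets_alt rows all_bus
instance (rows : List (List (String × Int))) (all_bus : List String) (out : List (Int × List String)) : Decidable (Spec_get_baskets rows all_bus out) := by unfold Spec_get_baskets; infer_instance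

-- ===== CLAIM (what is proved, stated in full; the proofs are below) =====
def Claim_equal_get_baskets : Prop := ∀ (rows : List (List (String × Int))) (all_bus : List String), Dom_get_baskets rows all_bus → Pre_get_baskets rows all_bus → Spec_get_baskets rows all_bus (get_baskets rows all_bus)

-- ===== LEMMAS AND PROOFS =====

-- the basket number of a business, and the flat keyed list both programs agree on
def pvKey (rows : List (List (String × Int))) (b : String) : Int :=
  PySem.Int.mod
    ((rows.foldl (fun a r => a + pvRowGet r b) 0) + (rows.foldl (fun a r => a * pvRowGet r b) 1))
    1000000

def pvKeyed (rows : List (List (String × Int))) (all_bus : List String) : List (Int × String) :=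
  all_bus.map (fun b => (pvKey rows b, b))

-- the group a key collects out of the keyed list
def pvGroup (keyed : List (Int × String)) (k : Int) : List String :=
  (keyed.filter (fun kb2 => kb2.1 == k)).map Prod.snd

-- the canonical result both programs compute
def pvCanon (keyed : List (Int × String)) : List (Int × List String) :=
  ((PySem.Set.ofList (keyed.map Prod.fst)).map (fun k => (k, pvGroup keyed k))).filter
    (fun kv => 1 < kv.2.length)

-- the filtering loop over fresh distinct keys builds exactly the filtered items list
lemma pv_filter_fold (l : List (Int × List String)) :
    ∀ (r : PySem.Dict Int (List String)), (l.map Prod.fst).Nodup →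
      (∀ kv ∈ l, r.contains kv.1 = false) →
      (l.foldl (fun (r : PySem.Dict Int (List String)) kv =>
        if 1 < kv.2.length then r.insert kv.1 kv.2 else r) r).items
        = r.items ++ l.filter (fun kv => 1 < kv.2.length) := by
  induction l with
  | nil => intro r _ _; simp
  | cons kv l ih =>
    intro r hnd hf
    have hndl : (l.map Prod.fst).Nodup := by simpa using hnd.sublist (by simp)
    have hnd2 : (kv.1 :: l.map Prod.fst).Nodup := by simpa using hnd
    have hne : ∀ p ∈ l, p.1 ≠ kv.1 := by
      intro p hp heq
      exact (List.nodup_cons.1 hnd2).1 (heq ▸ List.mem_map_of_mem hp)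
    simp only [List.foldl_cons]
    by_cases hc : 1 < kv.2.length
    · rw [if_pos hc, ih _ hndl ?_, PySem.Dict.items_insert_of_not_contains _ _ (hf kv (by simp))]
      · simp [hc]
      · intro p hp
        rw [PySem.Dict.contains_insert]
        simp [hne p hp, hf p (by simp [hp])]
    · rw [if_neg hc, ih _ hndl (fun p hp => hf p (by simp [hp]))]
      simp [hc]

-- A's bucket-building fold, rewritten over the keyed list, is Dict.modify-append
lemma pvA_temp (rows : List (List (String × Int))) (all_bus : List String) :
    (all_bus.foldl (fun (d : PySem.Dict Int (List String)) each_bus =>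
      let tp := rows.foldl
        (fun (tp : Int × Int) each_dict =>
          (tp.1 + pvRowGet each_dict each_bus, tp.2 * pvRowGet each_dict each_bus)) ((0 : Int), (1 : Int))
      let basket_number := PySem.Int.mod (tp.1 + tp.2) 1000000
      d.insert basket_number (d.getD basket_number [] ++ [each_bus])) PySem.Dict.empty)
    = (pvKeyed rows all_bus).foldl
        (fun (d : PySem.Dict Int (List String)) p => d.modify p.1 [] (· ++ [p.2])) PySem.Dict.empty := by
  rw [pvKeyed, List.foldl_map]
  apply PySem.List.foldl_congr_mem
  intro d b hb
  have hpm : rows.foldl (fun (tp : Int × Int) r => (tp.1 + pvRowGet r b, tp.2 * pvRowGet r b)) ((0:Int), (1:Int))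
      = (rows.foldl (fun a r => a + pvRowGet r b) 0, rows.foldl (fun a r => a * pvRowGet r b) 1) := by
    exact PySem.List.foldl_prod_mk
      (fun (a : Int) (r : List (String × Int)) => a + pvRowGet r b)
      (fun (a : Int) (r : List (String × Int)) => a * pvRowGet r b) rows 0 1
  simp only [hpm, pvKey]
  rfl

-- A's result is the canonical grouped-and-filtered list
lemma pvA_canon (rows : List (List (String × Int))) (all_bus : List String) :
    get_baskets rows all_bus = pvCanon (pvKeyed rows all_bus) := by
  unfold get_baskets
  rw [pvA_temp]
  set keyed := pvKeyed rows all_bus with hkeyed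
  set temp := keyed.foldl
      (fun (d : PySem.Dict Int (List String)) p => d.modify p.1 [] (· ++ [p.2])) PySem.Dict.empty
    with htemp
  have hkeys : temp.keys = PySem.Set.ofList (keyed.map Prod.fst) := by
    rw [htemp]
    have := PySem.Dict.keys_foldl_modify_key keyed Prod.fst ([] : List String)
      (fun (_ : PySem.Dict Int (List String)) (p : Int × String) (v : List String) => v ++ [p.2])
      PySem.Dict.empty
    simpa [PySem.Dict.keys_empty, PySem.Set.update_nil_left] using this
  have hnd : temp.keys.Nodup := by rw [hkeys]; exact PySem.Set.nodup_ofList _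
  have hitems : temp.items = (PySem.Set.ofList (keyed.map Prod.fst)).map
      (fun k => (k, pvGroup keyed k)) := by
    rw [PySem.Dict.items_eq_map_keys temp hnd [], hkeys]
    apply List.map_congr_left
    intro k _
    have := PySem.Dict.getD_foldl_modify_append keyed PySem.Dict.empty k
    rw [htemp, this]
    simp [pvGroup]
  show (List.foldl (fun (r : PySem.Dict Int (List String)) kv =>
      if 1 < kv.2.length then r.insert kv.1 kv.2 else r) PySem.Dict.empty temp.items).items = pvCanon keyed
  rw [hitems, pv_filter_fold _ PySem.Dict.empty ?_ (fun kv _ => PySem.Dict.contains_empty kv.1)]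
  · simp [pvCanon, PySem.Dict.empty]
  · have : ((PySem.Set.ofList (keyed.map Prod.fst)).map
        (fun k => (k, pvGroup keyed k))).map Prod.fst = PySem.Set.ofList (keyed.map Prod.fst) := by
      simp [Function.comp_def]
    rw [this]
    exact PySem.Set.nodup_ofList _

-- B's keyed-building fold produces the same flat keyed list
lemma pvB_keyed (rows : List (List (String × Int))) (all_bus : List String) :
    (all_bus.foldl (fun keyed b =>
      let vals := rows.map (fun row => pvRowGet row b)
      let p := vals.foldl (fun p v => p * v) 1
      keyed ++ [(PySem.Int.mod (vals.sum + p) 1000000, b)]) [])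
    = pvKeyed rows all_bus := by
  have hstep : ∀ (acc : List (Int × String)), ∀ b ∈ all_bus,
      (fun keyed b =>
        let vals := rows.map (fun row => pvRowGet row b)
        let p := vals.foldl (fun p v => p * v) 1
        keyed ++ [(PySem.Int.mod (vals.sum + p) 1000000, b)]) acc b
      = (fun keyed b => keyed ++ [(pvKey rows b, b)]) acc b := by
    intro acc b _
    have hsum : (rows.map (fun row => pvRowGet row b)).sum
        = rows.foldl (fun a r => a + pvRowGet r b) 0 := by
      rw [List.sum_eq_foldl, List.foldl_map]
    have hprod : (rows.map (fun row => pvRowGet row b)).foldl (fun p v => p * v) 1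
        = rows.foldl (fun a r => a * pvRowGet r b) 1 := by
      rw [List.foldl_map]
    simp only [hsum, hprod, pvKey]
  rw [PySem.List.foldl_congr_mem all_bus _ _ [] hstep,
    PySem.List.foldl_append_singleton_eq_map]
  simp [pvKeyed]

-- B's grouping loop: scanning per first-seen key builds the canonical filtered list
lemma pvB_loop (g : Int → List String) (l : List (Int × String)) :
    ∀ (d : PySem.Dict Int (List String)) (s : PySem.Set Int), s.Nodup →
      d.items = (s.map (fun k => (k, g k))).filter (fun kv => 1 < kv.2.length) →
      (l.foldl (fun (st : PySem.Dict Int (List String) × PySem.Set Int) kb =>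
          if PySem.Set.contains st.2 kb.1 then st
          else (if 1 < (g kb.1).length then st.1.insert kb.1 (g kb.1) else st.1,
                PySem.Set.add st.2 kb.1)) (d, s)).1.items
      = ((PySem.Set.update s (l.map Prod.fst)).map (fun k => (k, g k))).filter
          (fun kv => 1 < kv.2.length) := by
  induction l with
  | nil => intro d s _ hitems; simpa [PySem.Set.update] using hitems
  | cons kb l ih =>
    intro d s hnd hitems
    simp only [List.foldl_cons, List.map_cons]
    have hupd : PySem.Set.update s (kb.1 :: l.map Prod.fst)
        = PySem.Set.update (PySem.Set.add s kb.1) (l.map Prod.fst) := rfl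
    by_cases hc : PySem.Set.contains s kb.1 = true
    · rw [if_pos hc, hupd]
      have hadd : PySem.Set.add s kb.1 = s := by
        simp only [PySem.Set.add, hc, if_true]
      rw [hadd]
      exact ih d s hnd hitems
    · rw [if_neg hc, hupd]
      have hc' : kb.1 ∉ s := fun h => hc ((PySem.Set.contains_iff s kb.1).2 h)
      have hadd : PySem.Set.add s kb.1 = s ++ [kb.1] := by
        simp only [PySem.Set.add, hc, if_false, Bool.false_eq_true]
      have hnd' : (PySem.Set.add s kb.1).Nodup := PySem.Set.nodup_add s kb.1 hnd
      have hdc : d.contains kb.1 = false := by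
        by_contra h
        have h' : d.contains kb.1 = true := by
          cases hx : d.contains kb.1 with
          | false => exact absurd hx h
          | true => rfl
        have hk : kb.1 ∈ d.keys := (PySem.Dict.contains_iff_mem_keys d kb.1).1 h'
        have : kb.1 ∈ s := by
          simp only [PySem.Dict.keys, hitems] at hk
          rcases List.mem_map.1 hk with ⟨p, hp, hp1⟩
          rcases List.mem_map.1 (List.mem_of_mem_filter hp) with ⟨k, hks, hkp⟩
          rw [← hp1, ← hkp]
          exact hks
        exact hc' this
      have hitems' :
          (if 1 < (g kb.1).length then d.insert kb.1 (g kb.1) else d).items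
          = ((PySem.Set.add s kb.1).map (fun k => (k, g k))).filter (fun kv => 1 < kv.2.length) := by
        rw [hadd]
        by_cases hg : 1 < (g kb.1).length
        · rw [if_pos hg, PySem.Dict.items_insert_of_not_contains _ _ hdc, hitems]
          simp [hg]
        · rw [if_neg hg, hitems]
          simp [hg]
      exact ih _ _ hnd' hitems'

-- B's result is the canonical grouped-and-filtered list
lemma pvB_canon (rows : List (List (String × Int))) (all_bus : List String) :
    get_baskets_alt rows all_bus = pvCanon (pvKeyed rows all_bus) := by
  unfold get_baskets_alt
  rw [pvB_keyed]
  set keyed := pvKeyed rows all_bus with hkeyed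
  have := pvB_loop (pvGroup keyed) keyed PySem.Dict.empty PySem.Set.empty
    (by simp [PySem.Set.empty]) (by simp [PySem.Set.empty, PySem.Dict.empty])
  simp only [pvGroup] at this
  rw [this]
  simp [pvCanon, pvGroup, PySem.Set.empty, PySem.Set.update_nil_left]

-- ===== VERDICT (by name: the statement is the Claim_ definition above) =====
theorem get_baskets_spec : Claim_equal_get_baskets := by
  intro rows all_bus _ _
  unfold Spec_get_baskets
  rw [pvA_canon, pvB_canon]
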